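-- pv_equiv track=rewrite | github.com/vaddisrinivas/cc-later | scripts/migrate_v4.py | toml_to_env
-- ===== SOURCE A (Python) =====
-- def _parse_toml_simple(text: str) -> dict[str, dict[str, str]]:
--     """Minimal TOML parser for the flat cc-later config subset."""
--     result: dict[str, dict[str, str]] = {}
--     section = "_root"
--     for line in text.splitlines():
--         line = line.strip()
--         if not line or line.startswith("#"):
--             continue
--         if line.startswith("[") and line.endswith("]"):
--             section = line[1:-1].strip()
--             continue
--         if "=" in line:
--             key, _, val = line.partition("=")
--             result.setdefault(section, {})[key.strip()] = val.strip().strip('"').strip("'")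
--     return result
--
-- def toml_to_env(toml_text: str) -> str:
--     data = _parse_toml_simple(toml_text)
--
--     def get(section: str, key: str, default: str) -> str:
--         return data.get(section, {}).get(key, default)
--
--     def fmt_list(val: str) -> str:
--         # TOML array like ["a", "b"] → a,b
--         val = val.strip()
--         if val.startswith("[") and val.endswith("]"):
--             items = [i.strip().strip('"').strip("'") for i in val[1:-1].split(",")]
--             return ",".join(i for i in items if i)
--         return val
--
--     watch = fmt_list(get("paths", "watch", ""))
--     later_path = get("later", "path", ".claude/LATER.md")
--     max_entries = get("later", "max_entries_per_dispatch", "3")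
--     auto_gitignore = get("later", "auto_gitignore", "true")
--     dispatch_enabled = get("dispatch", "enabled", "true")
--     dispatch_model = get("dispatch", "model", "sonnet")
--     allow_writes = get("dispatch", "allow_file_writes", "false")
--     output_path = get("dispatch", "output_path", "~/.cc-later/results/{repo}-{date}.json")
--     dispatch_mode = get("window", "dispatch_mode", "window_aware")
--     trigger_min = get("window", "trigger_at_minutes_remaining", "30")
--     idle_grace = get("window", "idle_grace_period_minutes", "10")
--     fallback_hours = fmt_list(get("window", "fallback_dispatch_hours", ""))
--     jsonl_paths = fmt_list(get("window", "jsonl_paths", ""))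
--     weekly_budget = get("limits", "weekly_budget_tokens", "10000000").replace("_", "")
--     backoff_pct = get("limits", "backoff_at_pct", "80")
--     auto_resume_enabled = get("auto_resume", "enabled", "true")
--     min_remaining = get("auto_resume", "min_remaining_minutes", "240")
--
--     return f"""\
-- # cc-later configuration (migrated from config.toml by migrate_v4.py)
-- # Empty PATHS_WATCH means: auto-watch the current repo where the hook runs.
-- PATHS_WATCH={watch}
--
-- LATER_PATH={later_path}
-- LATER_MAX_ENTRIES_PER_DISPATCH={max_entries}
-- LATER_AUTO_GITIGNORE={auto_gitignore}
--
-- # Dispatch settings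
-- DISPATCH_ENABLED={dispatch_enabled}
-- DISPATCH_MODEL={dispatch_model}
-- DISPATCH_ALLOW_FILE_WRITES={allow_writes}
-- DISPATCH_OUTPUT_PATH={output_path}
--
-- # window_aware: use Claude JSONL usage window
-- # time_based: only dispatch inside WINDOW_FALLBACK_DISPATCH_HOURS
-- # always: dispatch whenever idle
-- WINDOW_DISPATCH_MODE={dispatch_mode}
-- WINDOW_TRIGGER_AT_MINUTES_REMAINING={trigger_min}
-- WINDOW_IDLE_GRACE_PERIOD_MINUTES={idle_grace}
-- # Comma-separated HH:MM-HH:MM ranges, e.g. 09:00-17:00,22:00-24:00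
-- WINDOW_FALLBACK_DISPATCH_HOURS={fallback_hours}
-- # Comma-separated paths to JSONL files (leave empty to auto-detect)
-- WINDOW_JSONL_PATHS={jsonl_paths}
--
-- LIMITS_WEEKLY_BUDGET_TOKENS={weekly_budget}
-- LIMITS_BACKOFF_AT_PCT={backoff_pct}
--
-- # Resume tasks that failed due to rate/usage limits in the next fresh window.
-- AUTO_RESUME_ENABLED={auto_resume_enabled}
-- AUTO_RESUME_MIN_REMAINING_MINUTES={min_remaining}
-- """
-- ===== SOURCE B (Python) =====
-- def _parse_toml_simple(text):
--     result = {}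
--     section = "_root"
--     for line in text.splitlines():
--         line = line.strip()
--         if not line or line.startswith("#"):
--             continue
--         if line.startswith("[") and line.endswith("]"):
--             section = line[1:-1].strip()
--             continue
--         if "=" in line:
--             key, _, val = line.partition("=")
--             result.setdefault(section, {})[key.strip()] = val.strip().strip('"').strip("'")
--     return result
--
-- # Declarative spec: literal lines interleaved with field descriptors
-- # (env name, section, key, default, transform kind).
-- _SPEC = [
--     "# cc-later configuration (migrated from config.toml by migrate_v4.py)",
--     "# Empty PATHS_WATCH means: auto-watch the current repo where the hook runs.",
--     ("PATHS_WATCH", "paths", "watch", "", "list"),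
--     "",
--     ("LATER_PATH", "later", "path", ".claude/LATER.md", "plain"),
--     ("LATER_MAX_ENTRIES_PER_DISPATCH", "later", "max_entries_per_dispatch", "3", "plain"),
--     ("LATER_AUTO_GITIGNORE", "later", "auto_gitignore", "true", "plain"),
--     "",
--     "# Dispatch settings",
--     ("DISPATCH_ENABLED", "dispatch", "enabled", "true", "plain"),
--     ("DISPATCH_MODEL", "dispatch", "model", "sonnet", "plain"),
--     ("DISPATCH_ALLOW_FILE_WRITES", "dispatch", "allow_file_writes", "false", "plain"),
--     ("DISPATCH_OUTPUT_PATH", "dispatch", "output_path", "~/.cc-later/results/{repo}-{date}.json", "plain"),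
--     "",
--     "# window_aware: use Claude JSONL usage window",
--     "# time_based: only dispatch inside WINDOW_FALLBACK_DISPATCH_HOURS",
--     "# always: dispatch whenever idle",
--     ("WINDOW_DISPATCH_MODE", "window", "dispatch_mode", "window_aware", "plain"),
--     ("WINDOW_TRIGGER_AT_MINUTES_REMAINING", "window", "trigger_at_minutes_remaining", "30", "plain"),
--     ("WINDOW_IDLE_GRACE_PERIOD_MINUTES", "window", "idle_grace_period_minutes", "10", "plain"),
--     "# Comma-separated HH:MM-HH:MM ranges, e.g. 09:00-17:00,22:00-24:00",
--     ("WINDOW_FALLBACK_DISPATCH_HOURS", "window", "fallback_dispatch_hours", "", "list"),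
--     "# Comma-separated paths to JSONL files (leave empty to auto-detect)",
--     ("WINDOW_JSONL_PATHS", "window", "jsonl_paths", "", "list"),
--     "",
--     ("LIMITS_WEEKLY_BUDGET_TOKENS", "limits", "weekly_budget_tokens", "10000000", "nounder"),
--     ("LIMITS_BACKOFF_AT_PCT", "limits", "backoff_at_pct", "80", "plain"),
--     "",
--     "# Resume tasks that failed due to rate/usage limits in the next fresh window.",
--     ("AUTO_RESUME_ENABLED", "auto_resume", "enabled", "true", "plain"),
--     ("AUTO_RESUME_MIN_REMAINING_MINUTES", "auto_resume", "min_remaining_minutes", "240", "plain"),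
-- ]
--
-- def _transform(kind, val):
--     if kind == "list":
--         val = val.strip()
--         if val.startswith("[") and val.endswith("]"):
--             items = [i.strip().strip('"').strip("'") for i in val[1:-1].split(",")]
--             return ",".join(i for i in items if i)
--         return val
--     if kind == "nounder":
--         return val.replace("_", "")
--     return val
--
-- def toml_to_env(toml_text: str) -> str:
--     data = _parse_toml_simple(toml_text)
--     out = ""
--     for item in _SPEC:
--         if isinstance(item, str):
--             line = item
--         else:
--             name, section, key, default, kind = item
--             line = name + "=" + _transform(kind, data.get(section, {}).get(key, default))
--         out = out + line + "\n"
--     return out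
-- ===== Notes on version B (the rewrite author's own statement) =====
-- stated objective: idiomatic
-- what changed: A's straight-line body (17 extracted locals interpolated into one giant f-string) is replaced by a declarative ordered spec table of literal lines and field descriptors (env name, section, key, default, transform kind) that a single loop renders and accumulates; the parser is unchanged.
import Mathlib
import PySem

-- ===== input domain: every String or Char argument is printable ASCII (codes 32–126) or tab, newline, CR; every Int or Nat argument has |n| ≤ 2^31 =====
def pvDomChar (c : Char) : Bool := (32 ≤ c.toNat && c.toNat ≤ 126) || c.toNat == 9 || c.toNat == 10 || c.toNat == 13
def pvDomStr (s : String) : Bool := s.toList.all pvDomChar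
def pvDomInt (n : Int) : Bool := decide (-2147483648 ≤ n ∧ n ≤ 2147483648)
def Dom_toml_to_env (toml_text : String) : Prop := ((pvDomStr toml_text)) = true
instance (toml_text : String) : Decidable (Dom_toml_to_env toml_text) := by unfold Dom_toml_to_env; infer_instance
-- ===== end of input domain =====

-- B replaces A's straight-line extract-then-f-string body by a table-driven loop over a
-- declarative spec (literal lines and field descriptors); same parser, same output text.

set_option maxRecDepth 100000

-- ===== PORT A =====
-- val.strip().strip('"').strip("'")
def pvStripVal (v : String) : String :=
  PySem.Str.stripChars (PySem.Str.stripChars (PySem.Str.strip v) "\"") "'"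

-- one iteration of _parse_toml_simple's loop; state = (section, result)
def pvParseLine (acc : String × PySem.Dict String (PySem.Dict String String)) (rawLine : String) :
    String × PySem.Dict String (PySem.Dict String String) :=
  let line := PySem.Str.strip rawLine
  if line = "" then acc
  else if PySem.Str.startswith line "#" then acc
  else if PySem.Str.startswith line "[" && PySem.Str.endswith line "]" then
    (PySem.Str.strip (PySem.Str.slice line (some 1) (some (-1))), acc.2)
  else if PySem.Str.isIn "=" line then
    -- hand port of line.partition("="), exact here because "=" occurs in line:
    -- key = text before the first "=", val = text after it
    let i := PySem.Str.find line "="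
    let key := PySem.Str.slice line none (some i)
    let val := PySem.Str.slice line (some (i + 1)) none
    -- result.setdefault(section, {})[key.strip()] = stripped val
    (acc.1, acc.2.modify acc.1 PySem.Dict.empty (fun inner => inner.insert (PySem.Str.strip key) (pvStripVal val)))
  else acc

-- _parse_toml_simple (identical in A's module and in Source B, so ported once and shared)
def pvParseToml (text : String) : PySem.Dict String (PySem.Dict String String) :=
  ((PySem.Str.splitlines text).foldl pvParseLine ("_root", PySem.Dict.empty)).2

-- the inner 'get': data.get(section, {}).get(key, default)
def pvGet (data : PySem.Dict String (PySem.Dict String String)) (sec key dflt : String) : String :=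
  (data.getD sec PySem.Dict.empty).getD key dflt

-- fmt_list
def pvFmtList (val : String) : String :=
  let v := PySem.Str.strip val
  if PySem.Str.startswith v "[" && PySem.Str.endswith v "]" then
    -- v[1:-1].split(","): the separator is the literal ",", so split? is always `some`
    let items := ((PySem.Str.split? (PySem.Str.slice v (some 1) (some (-1))) ",").getD []).map pvStripVal
    PySem.Str.join "," (items.filter (fun i => i ≠ ""))
  else v

def toml_to_env (toml_text : String) : String :=
  let data := pvParseToml toml_text
  let v_watch := pvFmtList (pvGet data "paths" "watch" "")
  let v_later_path := pvGet data "later" "path" ".claude/LATER.md"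
  let v_max_entries := pvGet data "later" "max_entries_per_dispatch" "3"
  let v_auto_gitignore := pvGet data "later" "auto_gitignore" "true"
  let v_dispatch_enabled := pvGet data "dispatch" "enabled" "true"
  let v_dispatch_model := pvGet data "dispatch" "model" "sonnet"
  let v_allow_writes := pvGet data "dispatch" "allow_file_writes" "false"
  let v_output_path := pvGet data "dispatch" "output_path" "~/.cc-later/results/{repo}-{date}.json"
  let v_dispatch_mode := pvGet data "window" "dispatch_mode" "window_aware"
  let v_trigger_min := pvGet data "window" "trigger_at_minutes_remaining" "30"
  let v_idle_grace := pvGet data "window" "idle_grace_period_minutes" "10"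
  let v_fallback_hours := pvFmtList (pvGet data "window" "fallback_dispatch_hours" "")
  let v_jsonl_paths := pvFmtList (pvGet data "window" "jsonl_paths" "")
  let v_weekly_budget := PySem.Str.replace (pvGet data "limits" "weekly_budget_tokens" "10000000") "_" ""
  let v_backoff_pct := pvGet data "limits" "backoff_at_pct" "80"
  let v_auto_resume_enabled := pvGet data "auto_resume" "enabled" "true"
  let v_min_remaining := pvGet data "auto_resume" "min_remaining_minutes" "240"
  "# cc-later configuration (migrated from config.toml by migrate_v4.py)\n# Empty PATHS_WATCH means: auto-watch the current repo where the hook runs.\nPATHS_WATCH=" ++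
    v_watch ++ "\n\nLATER_PATH=" ++
    v_later_path ++ "\nLATER_MAX_ENTRIES_PER_DISPATCH=" ++
    v_max_entries ++ "\nLATER_AUTO_GITIGNORE=" ++
    v_auto_gitignore ++ "\n\n# Dispatch settings\nDISPATCH_ENABLED=" ++
    v_dispatch_enabled ++ "\nDISPATCH_MODEL=" ++
    v_dispatch_model ++ "\nDISPATCH_ALLOW_FILE_WRITES=" ++
    v_allow_writes ++ "\nDISPATCH_OUTPUT_PATH=" ++
    v_output_path ++ "\n\n# window_aware: use Claude JSONL usage window\n# time_based: only dispatch inside WINDOW_FALLBACK_DISPATCH_HOURS\n# always: dispatch whenever idle\nWINDOW_DISPATCH_MODE=" ++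
    v_dispatch_mode ++ "\nWINDOW_TRIGGER_AT_MINUTES_REMAINING=" ++
    v_trigger_min ++ "\nWINDOW_IDLE_GRACE_PERIOD_MINUTES=" ++
    v_idle_grace ++ "\n# Comma-separated HH:MM-HH:MM ranges, e.g. 09:00-17:00,22:00-24:00\nWINDOW_FALLBACK_DISPATCH_HOURS=" ++
    v_fallback_hours ++ "\n# Comma-separated paths to JSONL files (leave empty to auto-detect)\nWINDOW_JSONL_PATHS=" ++
    v_jsonl_paths ++ "\n\nLIMITS_WEEKLY_BUDGET_TOKENS=" ++
    v_weekly_budget ++ "\nLIMITS_BACKOFF_AT_PCT=" ++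
    v_backoff_pct ++ "\n\n# Resume tasks that failed due to rate/usage limits in the next fresh window.\nAUTO_RESUME_ENABLED=" ++
    v_auto_resume_enabled ++ "\nAUTO_RESUME_MIN_REMAINING_MINUTES=" ++
    v_min_remaining ++ "\n"

-- ===== PORT B =====
inductive PvKind where
  | plain | list | nounder
deriving DecidableEq, Repr

inductive PvItem where
  | lit : String → PvItem
  | field : String → String → String → String → PvKind → PvItem
deriving DecidableEq, Repr

-- the declarative _SPEC table
def pvSpec : List PvItem :=
  [.lit "# cc-later configuration (migrated from config.toml by migrate_v4.py)",
   .lit "# Empty PATHS_WATCH means: auto-watch the current repo where the hook runs.",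
   .field "PATHS_WATCH" "paths" "watch" "" .list,
   .lit "",
   .field "LATER_PATH" "later" "path" ".claude/LATER.md" .plain,
   .field "LATER_MAX_ENTRIES_PER_DISPATCH" "later" "max_entries_per_dispatch" "3" .plain,
   .field "LATER_AUTO_GITIGNORE" "later" "auto_gitignore" "true" .plain,
   .lit "",
   .lit "# Dispatch settings",
   .field "DISPATCH_ENABLED" "dispatch" "enabled" "true" .plain,
   .field "DISPATCH_MODEL" "dispatch" "model" "sonnet" .plain,
   .field "DISPATCH_ALLOW_FILE_WRITES" "dispatch" "allow_file_writes" "false" .plain,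
   .field "DISPATCH_OUTPUT_PATH" "dispatch" "output_path" "~/.cc-later/results/{repo}-{date}.json" .plain,
   .lit "",
   .lit "# window_aware: use Claude JSONL usage window",
   .lit "# time_based: only dispatch inside WINDOW_FALLBACK_DISPATCH_HOURS",
   .lit "# always: dispatch whenever idle",
   .field "WINDOW_DISPATCH_MODE" "window" "dispatch_mode" "window_aware" .plain,
   .field "WINDOW_TRIGGER_AT_MINUTES_REMAINING" "window" "trigger_at_minutes_remaining" "30" .plain,
   .field "WINDOW_IDLE_GRACE_PERIOD_MINUTES" "window" "idle_grace_period_minutes" "10" .plain,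
   .lit "# Comma-separated HH:MM-HH:MM ranges, e.g. 09:00-17:00,22:00-24:00",
   .field "WINDOW_FALLBACK_DISPATCH_HOURS" "window" "fallback_dispatch_hours" "" .list,
   .lit "# Comma-separated paths to JSONL files (leave empty to auto-detect)",
   .field "WINDOW_JSONL_PATHS" "window" "jsonl_paths" "" .list,
   .lit "",
   .field "LIMITS_WEEKLY_BUDGET_TOKENS" "limits" "weekly_budget_tokens" "10000000" .nounder,
   .field "LIMITS_BACKOFF_AT_PCT" "limits" "backoff_at_pct" "80" .plain,
   .lit "",
   .lit "# Resume tasks that failed due to rate/usage limits in the next fresh window.",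
   .field "AUTO_RESUME_ENABLED" "auto_resume" "enabled" "true" .plain,
   .field "AUTO_RESUME_MIN_REMAINING_MINUTES" "auto_resume" "min_remaining_minutes" "240" .plain]

-- _transform
def pvTransform (kind : PvKind) (val : String) : String :=
  match kind with
  | .list =>
    let v := PySem.Str.strip val
    if PySem.Str.startswith v "[" && PySem.Str.endswith v "]" then
      -- v[1:-1].split(","): the separator is the literal ",", so split? is always `some`
      let items := ((PySem.Str.split? (PySem.Str.slice v (some 1) (some (-1))) ",").getD []).map pvStripVal
      PySem.Str.join "," (items.filter (fun i => i ≠ ""))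
    else v
  | .nounder => PySem.Str.replace val "_" ""
  | .plain => val

-- the rendered line for one spec item
def pvRender (data : PySem.Dict String (PySem.Dict String String)) (item : PvItem) : String :=
  match item with
  | .lit s => s
  | .field name sec key dflt kind => name ++ "=" ++ pvTransform kind (pvGet data sec key dflt)

def toml_to_env_alt (toml_text : String) : String :=
  let data := pvParseToml toml_text
  pvSpec.foldl (fun out item => out ++ pvRender data item ++ "\n") ""

-- ===== PRECONDITION & SPEC =====
def Spec_toml_to_env (toml_text : String) (out : String) : Prop := out = toml_to_env_alt toml_text
instance (toml_text : String) (out : String) : Decidable (Spec_toml_to_env toml_text out) := by unfold Spec_toml_to_env; infer_instance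

-- ===== CLAIM (what is proved, stated in full; the proofs are below) =====
def Claim_equal_toml_to_env : Prop := ∀ (toml_text : String), Dom_toml_to_env toml_text → Spec_toml_to_env toml_text (toml_to_env toml_text)

-- ===== LEMMAS AND PROOFS =====

-- the three transforms, named as A computes them
theorem pvTransform_list (v : String) : pvTransform .list v = pvFmtList v := rfl
theorem pvTransform_nounder (v : String) : pvTransform .nounder v = PySem.Str.replace v "_" "" := rfl
theorem pvTransform_plain (v : String) : pvTransform .plain v = v := rfl

-- A's one f-string and B's fold over the spec build the same text, whatever the 17 field values are
theorem pvFmtEq (v_watch v_later_path v_max_entries v_auto_gitignore v_dispatch_enabled v_dispatch_model v_allow_writes v_output_path v_dispatch_mode v_trigger_min v_idle_grace v_fallback_hours v_jsonl_paths v_weekly_budget v_backoff_pct v_auto_resume_enabled v_min_remaining : String) :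
    "# cc-later configuration (migrated from config.toml by migrate_v4.py)\n# Empty PATHS_WATCH means: auto-watch the current repo where the hook runs.\nPATHS_WATCH=" ++ v_watch ++ "\n\nLATER_PATH=" ++ v_later_path ++ "\nLATER_MAX_ENTRIES_PER_DISPATCH=" ++ v_max_entries ++ "\nLATER_AUTO_GITIGNORE=" ++ v_auto_gitignore ++ "\n\n# Dispatch settings\nDISPATCH_ENABLED=" ++ v_dispatch_enabled ++ "\nDISPATCH_MODEL=" ++ v_dispatch_model ++ "\nDISPATCH_ALLOW_FILE_WRITES=" ++ v_allow_writes ++ "\nDISPATCH_OUTPUT_PATH=" ++ v_output_path ++ "\n\n# window_aware: use Claude JSONL usage window\n# time_based: only dispatch inside WINDOW_FALLBACK_DISPATCH_HOURS\n# always: dispatch whenever idle\nWINDOW_DISPATCH_MODE=" ++ v_dispatch_mode ++ "\nWINDOW_TRIGGER_AT_MINUTES_REMAINING=" ++ v_trigger_min ++ "\nWINDOW_IDLE_GRACE_PERIOD_MINUTES=" ++ v_idle_grace ++ "\n# Comma-separated HH:MM-HH:MM ranges, e.g. 09:00-17:00,22:00-24:00\nWINDOW_FALLBACK_DISPATCH_HOURS="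 ++ v_fallback_hours ++ "\n# Comma-separated paths to JSONL files (leave empty to auto-detect)\nWINDOW_JSONL_PATHS=" ++ v_jsonl_paths ++ "\n\nLIMITS_WEEKLY_BUDGET_TOKENS=" ++ v_weekly_budget ++ "\nLIMITS_BACKOFF_AT_PCT=" ++ v_backoff_pct ++ "\n\n# Resume tasks that failed due to rate/usage limits in the next fresh window.\nAUTO_RESUME_ENABLED=" ++ v_auto_resume_enabled ++ "\nAUTO_RESUME_MIN_REMAINING_MINUTES=" ++ v_min_remaining ++ "\n"
  = ((((((((((((((((((((((((((((((("" ++ "# cc-later configuration (migrated from config.toml by migrate_v4.py)") ++ "\n" ++ "# Empty PATHS_WATCH means: auto-watch the current repo where the hook runs.") ++ "\n" ++ ("PATHS_WATCH" ++ "=" ++ v_watch)) ++ "\n" ++ "") ++ "\n" ++ ("LATER_PATH" ++ "=" ++ v_later_path)) ++ "\n" ++ ("LATER_MAX_ENTRIES_PER_DISPATCH" ++ "=" ++ v_max_entries)) ++ "\n" ++ ("LATER_AUTO_GITIGNORE" ++ "=" ++ v_auto_gitignore)) ++ "\n" ++ "") ++ "\n" ++ "# Dispatch settings") ++ "\n"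 ++ ("DISPATCH_ENABLED" ++ "=" ++ v_dispatch_enabled)) ++ "\n" ++ ("DISPATCH_MODEL" ++ "=" ++ v_dispatch_model)) ++ "\n" ++ ("DISPATCH_ALLOW_FILE_WRITES" ++ "=" ++ v_allow_writes)) ++ "\n" ++ ("DISPATCH_OUTPUT_PATH" ++ "=" ++ v_output_path)) ++ "\n" ++ "") ++ "\n" ++ "# window_aware: use Claude JSONL usage window") ++ "\n" ++ "# time_based: only dispatch inside WINDOW_FALLBACK_DISPATCH_HOURS") ++ "\n" ++ "# always: dispatch whenever idle") ++ "\n" ++ ("WINDOW_DISPATCH_MODE" ++ "=" ++ v_dispatch_mode)) ++ "\n" ++ ("WINDOW_TRIGGER_AT_MINUTES_REMAINING" ++ "=" ++ v_trigger_min)) ++ "\n" ++ ("WINDOW_IDLE_GRACE_PERIOD_MINUTES" ++ "=" ++ v_idle_grace)) ++ "\n" ++ "# Comma-separated HH:MM-HH:MM ranges, e.g. 09:00-17:00,22:00-24:00") ++ "\n" ++ ("WINDOW_FALLBACK_DISPATCH_HOURS" ++ "=" ++ v_fallback_hours)) ++ "\n" ++ "# Comma-separated paths to JSONL files (leave empty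 to auto-detect)") ++ "\n" ++ ("WINDOW_JSONL_PATHS" ++ "=" ++ v_jsonl_paths)) ++ "\n" ++ "") ++ "\n" ++ ("LIMITS_WEEKLY_BUDGET_TOKENS" ++ "=" ++ v_weekly_budget)) ++ "\n" ++ ("LIMITS_BACKOFF_AT_PCT" ++ "=" ++ v_backoff_pct)) ++ "\n" ++ "") ++ "\n" ++ "# Resume tasks that failed due to rate/usage limits in the next fresh window.") ++ "\n" ++ ("AUTO_RESUME_ENABLED" ++ "=" ++ v_auto_resume_enabled)) ++ "\n" ++ ("AUTO_RESUME_MIN_REMAINING_MINUTES" ++ "=" ++ v_min_remaining)) ++ "\n" := by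
  have H : "# cc-later configuration (migrated from config.toml by migrate_v4.py)\n# Empty PATHS_WATCH means: auto-watch the current repo where the hook runs.\nPATHS_WATCH=" = "# cc-later configuration (migrated from config.toml by migrate_v4.py)" ++ "\n" ++ "# Empty PATHS_WATCH means: auto-watch the current repo where the hook runs." ++ "\n" ++ "PATHS_WATCH" ++ "=" ∧
      "\n\nLATER_PATH=" = "\n" ++ "" ++ "\n" ++ "LATER_PATH" ++ "=" ∧
      "\nLATER_MAX_ENTRIES_PER_DISPATCH=" = "\n" ++ "LATER_MAX_ENTRIES_PER_DISPATCH" ++ "=" ∧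
      "\nLATER_AUTO_GITIGNORE=" = "\n" ++ "LATER_AUTO_GITIGNORE" ++ "=" ∧
      "\n\n# Dispatch settings\nDISPATCH_ENABLED=" = "\n" ++ "" ++ "\n" ++ "# Dispatch settings" ++ "\n" ++ "DISPATCH_ENABLED" ++ "=" ∧
      "\nDISPATCH_MODEL=" = "\n" ++ "DISPATCH_MODEL" ++ "=" ∧
      "\nDISPATCH_ALLOW_FILE_WRITES=" = "\n" ++ "DISPATCH_ALLOW_FILE_WRITES" ++ "=" ∧
      "\nDISPATCH_OUTPUT_PATH=" = "\n" ++ "DISPATCH_OUTPUT_PATH" ++ "=" ∧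
      "\n\n# window_aware: use Claude JSONL usage window\n# time_based: only dispatch inside WINDOW_FALLBACK_DISPATCH_HOURS\n# always: dispatch whenever idle\nWINDOW_DISPATCH_MODE=" = "\n" ++ "" ++ "\n" ++ "# window_aware: use Claude JSONL usage window" ++ "\n" ++ "# time_based: only dispatch inside WINDOW_FALLBACK_DISPATCH_HOURS" ++ "\n" ++ "# always: dispatch whenever idle" ++ "\n" ++ "WINDOW_DISPATCH_MODE" ++ "=" ∧
      "\nWINDOW_TRIGGER_AT_MINUTES_REMAINING=" = "\n" ++ "WINDOW_TRIGGER_AT_MINUTES_REMAINING" ++ "=" ∧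
      "\nWINDOW_IDLE_GRACE_PERIOD_MINUTES=" = "\n" ++ "WINDOW_IDLE_GRACE_PERIOD_MINUTES" ++ "=" ∧
      "\n# Comma-separated HH:MM-HH:MM ranges, e.g. 09:00-17:00,22:00-24:00\nWINDOW_FALLBACK_DISPATCH_HOURS=" = "\n" ++ "# Comma-separated HH:MM-HH:MM ranges, e.g. 09:00-17:00,22:00-24:00" ++ "\n" ++ "WINDOW_FALLBACK_DISPATCH_HOURS" ++ "=" ∧
      "\n# Comma-separated paths to JSONL files (leave empty to auto-detect)\nWINDOW_JSONL_PATHS=" = "\n" ++ "# Comma-separated paths to JSONL files (leave empty to auto-detect)" ++ "\n" ++ "WINDOW_JSONL_PATHS" ++ "=" ∧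
      "\n\nLIMITS_WEEKLY_BUDGET_TOKENS=" = "\n" ++ "" ++ "\n" ++ "LIMITS_WEEKLY_BUDGET_TOKENS" ++ "=" ∧
      "\nLIMITS_BACKOFF_AT_PCT=" = "\n" ++ "LIMITS_BACKOFF_AT_PCT" ++ "=" ∧
      "\n\n# Resume tasks that failed due to rate/usage limits in the next fresh window.\nAUTO_RESUME_ENABLED=" = "\n" ++ "" ++ "\n" ++ "# Resume tasks that failed due to rate/usage limits in the next fresh window." ++ "\n" ++ "AUTO_RESUME_ENABLED" ++ "=" ∧
      "\nAUTO_RESUME_MIN_REMAINING_MINUTES=" = "\n" ++ "AUTO_RESUME_MIN_REMAINING_MINUTES" ++ "=" ∧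
      "\n" = "\n" := by decide
  obtain ⟨h0, h1, h2, h3, h4, h5, h6, h7, h8, h9, h10, h11, h12, h13, h14, h15, h16, h17⟩ := H
  rw [h0, h1, h2, h3, h4, h5, h6, h7, h8, h9, h10, h11, h12, h13, h14, h15, h16, h17]
  simp only [String.append_assoc, String.empty_append]

-- ===== VERDICT (by name: the statement is the Claim_ definition above) =====
theorem toml_to_env_spec : Claim_equal_toml_to_env := by
  intro toml_text _
  show toml_to_env toml_text = toml_to_env_alt toml_text
  simp only [toml_to_env, toml_to_env_alt, pvSpec, List.foldl, pvRender,
    pvTransform_list, pvTransform_nounder, pvTransform_plain]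
  exact pvFmtEq _ _ _ _ _ _ _ _ _ _ _ _ _ _ _ _ _
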